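-- pv_equiv track=rewrite | github.com/MuhamadKhoirFahniNurIslami/Product-Developement | question_C.py | hitung_huruf_urut
-- ===== SOURCE A (Python) =====
-- def hitung_huruf_urut(text: str):
--     frekuensi = {}
--
--     for char in text:
--         if char.isalpha():
--             frekuensi[char] = frekuensi.get(char, 0) + 1
--
--     # Urutkan berdasarkan abjad (case-insensitive),
--     # tapi tetap pisahkan huruf besar dan kecil
--     hasil_urut = sorted(frekuensi.items(), key=lambda x: (x[0].lower(), x[0].isupper()))
--
--     # Format output ke dalam list seperti ["d":1, "e":1, ...]
--     output = [f'"{k}":{v}' for k, v in hasil_urut]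
--     return output
-- ===== SOURCE B (Python) =====
-- def hitung_huruf_urut(text: str):
--     letters = sorted((c for c in text if c.isalpha()),
--                      key=lambda c: (c.lower(), c.isupper()))
--     output = []
--     i = 0
--     while i < len(letters):
--         j = i + 1
--         while j < len(letters) and letters[j] == letters[i]:
--             j += 1
--         output.append(f'"{letters[i]}":{j - i}')
--         i = j
--     return output
-- ===== Notes on version B (the rewrite author's own statement) =====
-- stated objective: alternative
-- what changed: B sorts the full list of alphabetic characters by (lower, isupper) and counts runs of equal adjacent characters in one scan, instead of building a frequency dict and sorting its distinct items.
import Mathlib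
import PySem

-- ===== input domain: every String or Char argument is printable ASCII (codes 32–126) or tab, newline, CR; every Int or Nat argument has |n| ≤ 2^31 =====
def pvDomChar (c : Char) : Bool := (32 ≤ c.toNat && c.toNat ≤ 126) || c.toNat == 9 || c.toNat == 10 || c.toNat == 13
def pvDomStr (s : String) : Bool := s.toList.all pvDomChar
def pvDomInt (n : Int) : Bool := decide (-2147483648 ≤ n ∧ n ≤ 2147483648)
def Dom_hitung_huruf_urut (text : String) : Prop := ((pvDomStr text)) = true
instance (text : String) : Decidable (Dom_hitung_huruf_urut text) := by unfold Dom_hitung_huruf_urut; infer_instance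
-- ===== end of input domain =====

-- B sorts the full list of alphabetic characters by (lower, isupper) and counts runs of equal
-- adjacent characters in one scan, instead of building a frequency dict and sorting its
-- distinct items (objective: alternative).

-- ===== PORT A =====
def hitung_huruf_urut (text : String) : List String :=
  let frekuensi := text.toList.foldl
    (fun d c => if PySem.Chars.isalpha c then d.insert c (d.getD c 0 + 1) else d)
    (PySem.Dict.empty : PySem.Dict Char Int)
  let hasil_urut := PySem.List.sorted2 frekuensi.items
    (fun x => PySem.Chars.lowerChar x.1) (fun x => PySem.Chars.isupper x.1)
  hasil_urut.map (fun kv => String.ofList ('"' :: kv.1 :: '"' :: ':' :: PySem.Int.toChars kv.2))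

-- ===== PORT B =====
-- the inner while loop of Source B: advance j over the characters equal to letters[i],
-- emit the group's entry, continue at j
def pvGroupScan : List Char → List String
  | [] => []
  | c :: rest =>
    let g := rest.takeWhile (· == c)
    String.ofList ('"' :: c :: '"' :: ':' :: PySem.Int.toChars (1 + (g.length : Int)))
      :: pvGroupScan (rest.dropWhile (· == c))
termination_by l => l.length
decreasing_by
  simp only [List.length_cons]
  exact Nat.lt_succ_of_le (List.length_dropWhile_le _ _)

def hitung_huruf_urut_alt (text : String) : List String :=
  let letters := PySem.List.sorted2 (text.toList.filter PySem.Chars.isalpha)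
    PySem.Chars.lowerChar PySem.Chars.isupper
  pvGroupScan letters

-- ===== PRECONDITION & SPEC =====
def Spec_hitung_huruf_urut (text : String) (out : List String) : Prop := out = hitung_huruf_urut_alt text
instance (text : String) (out : List String) : Decidable (Spec_hitung_huruf_urut text out) := by unfold Spec_hitung_huruf_urut; infer_instance

-- ===== CLAIM (what is proved, stated in full; the proofs are below) =====
def Claim_equal_hitung_huruf_urut : Prop := ∀ (text : String), Dom_hitung_huruf_urut text → Spec_hitung_huruf_urut text (hitung_huruf_urut text)

-- ===== LEMMAS AND PROOFS =====

-- the sort key both programs use: (c.lower(), c.isupper()), lexicographic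
def pvK (c : Char) : Lex (Char × Bool) := toLex (PySem.Chars.lowerChar c, PySem.Chars.isupper c)

theorem pvK_injective : Function.Injective pvK := by
  intro a b h
  have h1 : PySem.Chars.lowerChar a = PySem.Chars.lowerChar b := congrArg (fun x => (ofLex x).1) h
  have h2 : PySem.Chars.isupper a = PySem.Chars.isupper b := congrArg (fun x => (ofLex x).2) h
  unfold PySem.Chars.lowerChar at h1
  by_cases hu : PySem.Chars.isupper a = true
  · rw [hu] at h2
    rw [if_pos hu, if_pos h2.symm] at h1
    have ha : 65 ≤ a.toNat ∧ a.toNat ≤ 90 := by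
      have := hu; unfold PySem.Chars.isupper at this
      simp only [Bool.and_eq_true, decide_eq_true_eq, Char.le_def] at this
      exact ⟨this.1, this.2⟩
    have hb : 65 ≤ b.toNat ∧ b.toNat ≤ 90 := by
      have := h2.symm; unfold PySem.Chars.isupper at this
      simp only [Bool.and_eq_true, decide_eq_true_eq, Char.le_def] at this
      exact ⟨this.1, this.2⟩
    have hA : (Char.ofNat (a.toNat + 32)).toNat = a.toNat + 32 := by
      rw [Char.toNat_ofNat, if_pos (Or.inl (by omega))]
    have hB : (Char.ofNat (b.toNat + 32)).toNat = b.toNat + 32 := by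
      rw [Char.toNat_ofNat, if_pos (Or.inl (by omega))]
    have : a.toNat = b.toNat := by
      have := congrArg Char.toNat h1
      rw [hA, hB] at this; omega
    exact Char.ext (UInt32.toNat_inj.mp this)
  · rw [if_neg hu, if_neg (by rw [← h2]; exact hu)] at h1
    exact h1

-- Python's 2-component tuple key is the lexicographic product key
theorem sorted2_eq_sorted_lex {α κ₁ κ₂ : Type} [LinearOrder κ₁] [LinearOrder κ₂]
    (xs : List α) (k1 : α → κ₁) (k2 : α → κ₂) :
    PySem.List.sorted2 xs k1 k2 = PySem.List.sorted xs (fun a => toLex (k1 a, k2 a)) := by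
  have hbefore : (fun a b : α => decide (k1 a < k1 b) || (!decide (k1 b < k1 a) && decide (k2 a < k2 b)))
      = (fun a b : α => decide (toLex (k1 a, k2 a) < toLex (k1 b, k2 b))) := by
    funext a b
    simp only [Prod.Lex.lt_iff]
    rcases lt_trichotomy (k1 a) (k1 b) with h | h | h
    · simp [h, h.not_gt]
    · simp [h]
    · simp [h.not_gt, h, h.ne']
  unfold PySem.List.sorted2 PySem.List.sorted
  rw [hbefore]

-- counts in the run-length expansion of a duplicate-free list
theorem count_flatMap_replicate (ds : List Char) (n : Char → Nat) (hnd : ds.Nodup) (a : Char) :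
    ((ds.flatMap fun c => List.replicate (n c) c).count a) = if a ∈ ds then n a else 0 := by
  induction ds with
  | nil => simp
  | cons c t ih =>
    rw [List.flatMap_cons, List.count_append, List.count_replicate,
        ih (List.Nodup.of_cons hnd)]
    by_cases hac : a = c
    · subst hac
      have : a ∉ t := (List.nodup_cons.mp hnd).1
      simp [this]
    · simp [hac, Ne.symm hac, beq_iff_eq]

theorem perm_flatMap_replicate (ds L : List Char) (hnd : ds.Nodup)
    (hm : ∀ x, x ∈ ds ↔ x ∈ L) :
    (ds.flatMap fun c => List.replicate (L.count c) c).Perm L := by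
  rw [List.perm_iff_count]
  intro a
  rw [count_flatMap_replicate ds _ hnd a]
  by_cases h : a ∈ ds
  · simp [h]
  · have : a ∉ L := fun hL => h ((hm a).mpr hL)
    simp [h, List.count_eq_zero_of_not_mem this]

theorem takeWhile_dropWhile_not (c : Char) (l : List Char) (h : ∀ x ∈ l, x ≠ c) :
    l.takeWhile (· == c) = [] ∧ l.dropWhile (· == c) = l := by
  cases l with
  | nil => simp
  | cons d t =>
    have : (d == c) = false := beq_eq_false_iff_ne.mpr (h d (by simp))
    simp [this]

-- the group scan of a run-length expansion lists each distinct element with its count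
theorem pvGroupScan_flatMap (ds : List Char) (n : Char → Nat)
    (hpos : ∀ c ∈ ds, 0 < n c) (hnd : ds.Nodup) :
    pvGroupScan (ds.flatMap fun c => List.replicate (n c) c)
      = ds.map (fun c => String.ofList ('"' :: c :: '"' :: ':' :: PySem.Int.toChars ((n c : Int)))) := by
  induction ds with
  | nil => simp [pvGroupScan]
  | cons c t ih =>
    obtain ⟨m, hm⟩ : ∃ m, n c = m + 1 :=
      ⟨n c - 1, by have := hpos c (by simp); omega⟩
    have hrest : ∀ x ∈ (t.flatMap fun d => List.replicate (n d) d), x ≠ c := by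
      intro x hx
      obtain ⟨d, hd, hxd⟩ := List.mem_flatMap.mp hx
      have : x = d := List.eq_of_mem_replicate hxd
      subst this
      exact fun h => (List.nodup_cons.mp hnd).1 (h ▸ hd)
    rw [List.flatMap_cons, hm, List.replicate_succ, List.cons_append]
    rw [pvGroupScan]
    have htails : ∀ x ∈ List.replicate m c, (x == c) = true := by
      intro x hx; rw [List.eq_of_mem_replicate hx]; simp
    rw [List.takeWhile_append_of_pos htails, List.dropWhile_append_of_pos htails,
        (takeWhile_dropWhile_not c _ hrest).1, (takeWhile_dropWhile_not c _ hrest).2,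
        List.append_nil]
    rw [ih (fun d hd => hpos d (by simp [hd])) (List.Nodup.of_cons hnd), List.map_cons]
    congr 2
    · congr 1
      rw [List.length_replicate, hm]; push_cast; ring_nf

theorem pv_pairwise_lt (L : List Char) :
    (PySem.List.sorted (PySem.Set.ofList L) pvK).Pairwise (fun a b => pvK a < pvK b) := by
  have hle := PySem.List.sorted_pairwise (PySem.Set.ofList L) pvK
  have hnd : (PySem.List.sorted (PySem.Set.ofList L) pvK).Nodup :=
    (PySem.List.sorted_perm (PySem.Set.ofList L) pvK false).symm.nodup (PySem.Set.nodup_ofList L)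
  exact (hle.and hnd).imp (fun h => lt_of_le_of_ne h.1 (fun e => h.2 (pvK_injective e)))

-- the core equivalence, over the filtered letter list L
theorem pv_main (L : List Char) :
    (PySem.List.sorted ((PySem.Set.ofList L).map (fun k => (k, (L.count k : Int))))
        (fun x => pvK x.1)).map
      (fun kv => String.ofList ('"' :: kv.1 :: '"' :: ':' :: PySem.Int.toChars kv.2))
      = pvGroupScan (PySem.List.sorted L pvK) := by
  set ds := PySem.List.sorted (PySem.Set.ofList L) pvK with hds
  have hmem : ∀ x, x ∈ ds ↔ x ∈ L := by
    intro x
    rw [hds, (PySem.List.sorted_perm (PySem.Set.ofList L) pvK false).mem_iff]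
    exact PySem.Set.mem_ofList L x
  have hnd : ds.Nodup :=
    (PySem.List.sorted_perm (PySem.Set.ofList L) pvK false).symm.nodup (PySem.Set.nodup_ofList L)
  have hlt := pv_pairwise_lt L
  -- A's sort of the distinct items is ds with counts attached
  have hA : PySem.List.sorted ((PySem.Set.ofList L).map (fun k => (k, (L.count k : Int))))
      (fun x => pvK x.1) = ds.map (fun k => (k, (L.count k : Int))) := by
    apply PySem.List.sorted_eq_of_perm_of_pairwise_lt
    · exact ((PySem.List.sorted_perm (PySem.Set.ofList L) pvK false).map _)
    · rw [List.pairwise_map]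
      exact hlt
  -- B's full sort is the run-length expansion of ds
  have hB : PySem.List.sorted L pvK = ds.flatMap (fun c => List.replicate (L.count c) c) := by
    apply PySem.List.eq_of_perm_of_pairwise_le_of_injective pvK pvK_injective
    · exact (PySem.List.sorted_perm L pvK false).trans
        (perm_flatMap_replicate ds L hnd hmem).symm
    · exact PySem.List.sorted_pairwise L pvK
    · rw [List.pairwise_flatMap]
      constructor
      · intro a _
        exact List.pairwise_replicate.mpr (Or.inr le_rfl)
      · exact hlt.imp (by
          intro a b h x hx y hy
          rw [List.eq_of_mem_replicate hx, List.eq_of_mem_replicate hy]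
          exact le_of_lt h)
  rw [hA, hB, List.map_map]
  rw [pvGroupScan_flatMap ds (fun c => L.count c)
      (fun c hc => List.count_pos_iff.mpr ((hmem c).mp hc)) hnd]
  rfl

-- ===== VERDICT (by name: the statement is the Claim_ definition above) =====
theorem hitung_huruf_urut_spec : Claim_equal_hitung_huruf_urut := by
  intro text _
  unfold Spec_hitung_huruf_urut hitung_huruf_urut hitung_huruf_urut_alt
  simp only [PySem.List.foldl_if_eq_foldl_filter, PySem.Dict.foldl_insert_getD_add_one_eq_counter,
      PySem.Dict.items_counter, sorted2_eq_sorted_lex]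
  exact pv_main (text.toList.filter PySem.Chars.isalpha)
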